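-- pv_equiv track=rewrite | github.com/manus-project/manus | python/manus_webshell/code_generator.py | prefix_lines_with_spaces
-- ===== SOURCE A (Python) =====
-- def prefix_lines_with_spaces(code, num_of_spaces):
--     res = list()
--     prefix = " " * num_of_spaces
--     for line in code.split("\n"):
--         if len(line) == 0:
--             res.append(line)
--         else:
--             res.append(prefix+line)
--     return "\n".join(res)
-- ===== SOURCE B (Python) =====
-- def prefix_lines_with_spaces(code, num_of_spaces):
--     # Single pass over the characters: insert the prefix at the start of every
--     # non-empty line while copying, instead of split/per-line loop/join.
--     prefix = " " * num_of_spaces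
--     out = []
--     at_start = True
--     for ch in code:
--         if at_start and ch != "\n":
--             out.append(prefix)
--         out.append(ch)
--         at_start = ch == "\n"
--     return "".join(out)
-- ===== Notes on version B (the rewrite author's own statement) =====
-- stated objective: alternative
-- what changed: Replaces split-on-newline / per-line loop / join with a single character-level pass that inserts the prefix at each start of a non-empty line while copying.
import Mathlib
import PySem

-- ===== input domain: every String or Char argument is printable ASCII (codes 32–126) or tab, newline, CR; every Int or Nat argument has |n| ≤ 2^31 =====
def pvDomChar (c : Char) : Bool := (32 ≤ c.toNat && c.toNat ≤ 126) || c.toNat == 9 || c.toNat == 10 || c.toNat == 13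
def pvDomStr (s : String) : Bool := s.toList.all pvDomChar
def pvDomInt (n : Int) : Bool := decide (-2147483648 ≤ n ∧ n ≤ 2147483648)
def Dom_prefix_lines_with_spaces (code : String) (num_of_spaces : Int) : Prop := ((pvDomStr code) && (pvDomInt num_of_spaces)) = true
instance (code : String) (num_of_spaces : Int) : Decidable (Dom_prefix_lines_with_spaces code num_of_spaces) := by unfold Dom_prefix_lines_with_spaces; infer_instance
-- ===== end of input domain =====

-- B makes one pass over the characters instead of split/per-line loop/join; alternative decomposition, same cost.

-- ===== PORT A =====
-- A: split on "\n", prepend prefix to non-empty lines, join with "\n".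
def prefix_lines_with_spaces (code : String) (num_of_spaces : Int) : String :=
  let prefixL : List Char := List.replicate num_of_spaces.toNat ' '  -- " " * n (negative n gives "")
  let res := (PySem.Chars.splitOn code.toList ['\n']).map
      (fun line => if line.length = 0 then line else prefixL ++ line)
  String.ofList (PySem.Chars.join ['\n'] res)

-- ===== PORT B =====
-- B: one left-to-right pass carrying an at_start-of-line flag, appending to out.
def prefix_lines_with_spaces_alt (code : String) (num_of_spaces : Int) : String :=
  let prefixL : List Char := List.replicate num_of_spaces.toNat ' '  -- " " * n (negative n gives "")
  let st := code.toList.foldl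
      (fun (s : List Char × Bool) ch =>
        (s.1 ++ (if s.2 && (ch != '\n') then prefixL else []) ++ [ch], ch == '\n'))
      ([], true)
  String.ofList st.1

-- ===== PRECONDITION & SPEC =====
def Spec_prefix_lines_with_spaces (code : String) (num_of_spaces : Int) (out : String) : Prop := out = prefix_lines_with_spaces_alt code num_of_spaces
instance (code : String) (num_of_spaces : Int) (out : String) : Decidable (Spec_prefix_lines_with_spaces code num_of_spaces out) := by unfold Spec_prefix_lines_with_spaces; infer_instance

-- ===== CLAIM (what is proved, stated in full; the proofs are below) =====
def Claim_equal_prefix_lines_with_spaces : Prop := ∀ (code : String) (num_of_spaces : Int), Dom_prefix_lines_with_spaces code num_of_spaces → Spec_prefix_lines_with_spaces code num_of_spaces (prefix_lines_with_spaces code num_of_spaces)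

-- ===== LEMMAS AND PROOFS =====

-- structural-recursion version of Python's str.split("\n") on char lists
def mySplit : List Char → List (List Char)
  | [] => [[]]
  | c :: cs =>
    if c = '\n' then [] :: mySplit cs
    else
      match mySplit cs with
      | [] => [[c]]
      | h :: t => (c :: h) :: t

-- reference recursion for B's scan
def bscan (p : List Char) : List Char → Bool → List Char
  | [], _ => []
  | c :: cs, b => (if b && (c != '\n') then p else []) ++ c :: bscan p cs (c == '\n')

def consHead (pre : List Char) : List (List Char) → List (List Char)
  | [] => [pre]
  | h :: t => (pre ++ h) :: t

theorem mySplit_ne_nil (cs : List Char) : mySplit cs ≠ [] := by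
  cases cs with
  | nil => simp [mySplit]
  | cons c cs =>
    simp only [mySplit]
    split
    · simp
    · cases h : mySplit cs <;> simp

theorem go_eq : ∀ (fuel : Nat) (l cur : List Char) (acc : List (List Char)),
    l.length + 1 ≤ fuel →
    PySem.Chars.splitOn.go ['\n'] fuel l cur acc = acc.reverse ++ consHead cur.reverse (mySplit l) := by
  intro fuel
  induction fuel with
  | zero => intro l cur acc h; omega
  | succ f ih =>
    intro l cur acc h
    cases l with
    | nil =>
      simp [PySem.Chars.splitOn.go, mySplit, consHead]
    | cons c rest =>
      by_cases hc : c = '\n'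
      · subst hc
        have hpre : List.isPrefixOf ['\n'] ('\n' :: rest) = true := by
          simp [List.isPrefixOf]
        rw [PySem.Chars.splitOn.go]
        simp only [hpre, if_pos]
        have hdrop : List.drop (['\n'].length) ('\n' :: rest) = rest := rfl
        rw [hdrop, ih rest [] (cur.reverse :: acc) (by simpa using Nat.le_of_succ_le_succ h)]
        obtain ⟨h', t', ht⟩ : ∃ h' t', mySplit rest = h' :: t' := by
          cases hm : mySplit rest with
          | nil => exact absurd hm (mySplit_ne_nil rest)
          | cons a b => exact ⟨a, b, rfl⟩
        simp [mySplit, ht, consHead]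
      · have hpre : List.isPrefixOf ['\n'] (c :: rest) = false := by
          simp only [List.isPrefixOf, Bool.and_eq_false_imp]
          simp
          exact fun hh => hc hh.symm
        rw [PySem.Chars.splitOn.go]
        simp only [hpre, Bool.false_eq_true, if_false]
        rw [ih rest (c :: cur) acc (by simpa using Nat.le_of_succ_le_succ h)]
        obtain ⟨h', t', ht⟩ : ∃ h' t', mySplit rest = h' :: t' := by
          cases hm : mySplit rest with
          | nil => exact absurd hm (mySplit_ne_nil rest)
          | cons a b => exact ⟨a, b, rfl⟩
        simp [mySplit, hc, ht, consHead]

theorem splitOn_eq_mySplit (cs : List Char) :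
    PySem.Chars.splitOn cs ['\n'] = mySplit cs := by
  unfold PySem.Chars.splitOn
  rw [go_eq (cs.length + 1) cs [] [] (le_refl _)]
  obtain ⟨h', t', ht⟩ : ∃ h' t', mySplit cs = h' :: t' := by
    cases hm : mySplit cs with
    | nil => exact absurd hm (mySplit_ne_nil cs)
    | cons a b => exact ⟨a, b, rfl⟩
  simp [ht, consHead]

theorem join_newline (h : List Char) (t : List (List Char)) :
    PySem.Chars.join ['\n'] (h :: t) = h ++ (t.map (fun l => '\n' :: l)).flatten := by
  induction t generalizing h with
  | nil => simp [PySem.Chars.join, List.intercalate]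
  | cons h2 t ih =>
    have hih := ih h2
    simp only [PySem.Chars.join, List.intercalate] at hih ⊢
    rw [List.intersperse_cons₂, List.flatten_cons, List.flatten_cons, hih]
    simp

theorem bscan_eq_split (p cs : List Char) :
    (∀ h t, mySplit cs = h :: t →
      bscan p cs true = (if h.length = 0 then h else p ++ h) ++
        (t.map (fun l => '\n' :: (if l.length = 0 then l else p ++ l))).flatten ∧
      bscan p cs false = h ++
        (t.map (fun l => '\n' :: (if l.length = 0 then l else p ++ l))).flatten) := by
  induction cs with
  | nil =>
    intro h t ht
    simp [mySplit] at ht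
    obtain ⟨rfl, rfl⟩ := ht
    simp [bscan]
  | cons c cs ih =>
    intro h t ht
    obtain ⟨h', t', ht'⟩ : ∃ h' t', mySplit cs = h' :: t' := by
      cases hm : mySplit cs with
      | nil => exact absurd hm (mySplit_ne_nil cs)
      | cons a b => exact ⟨a, b, rfl⟩
    obtain ⟨ih1, ih2⟩ := ih h' t' ht'
    by_cases hc : c = '\n'
    · subst hc
      simp [mySplit, ht'] at ht
      obtain ⟨rfl, rfl⟩ := ht
      constructor <;> simp [bscan, ih1]
    · simp [mySplit, hc, ht'] at ht
      obtain ⟨rfl, rfl⟩ := ht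
      have hne : (c :: h').length ≠ 0 := by simp
      have hb : (c == '\n') = false := by simp [hc]
      constructor
      · simp [bscan, hb, ih2, List.length_eq_zero_iff]
        exact fun hh => absurd hh hc
      · simp [bscan, hb, ih2, List.length_eq_zero_iff]

theorem foldl_eq_bscan (p : List Char) (cs : List Char) :
    ∀ (out : List Char) (b : Bool),
    (cs.foldl (fun (s : List Char × Bool) ch =>
        (s.1 ++ (if s.2 && (ch != '\n') then p else []) ++ [ch], ch == '\n'))
      (out, b)).1 = out ++ bscan p cs b := by
  induction cs with
  | nil => intro out b; simp [bscan]
  | cons c cs ih =>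
    intro out b
    simp only [List.foldl_cons, bscan]
    rw [ih]
    simp

-- ===== VERDICT (by name: the statement is the Claim_ definition above) =====
theorem prefix_lines_with_spaces_spec : Claim_equal_prefix_lines_with_spaces := by
  intro code num_of_spaces _
  unfold Spec_prefix_lines_with_spaces prefix_lines_with_spaces prefix_lines_with_spaces_alt
  simp only []
  set p := List.replicate num_of_spaces.toNat ' ' with hp
  rw [foldl_eq_bscan p code.toList [] true]
  rw [splitOn_eq_mySplit]
  obtain ⟨h, t, ht⟩ : ∃ h t, mySplit code.toList = h :: t := by
    cases hm : mySplit code.toList with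
    | nil => exact absurd hm (mySplit_ne_nil _)
    | cons a b => exact ⟨a, b, rfl⟩
  obtain ⟨k1, _⟩ := bscan_eq_split p code.toList h t ht
  rw [ht]
  simp only [List.map_cons, join_newline, List.map_map]
  rw [k1]
  simp [Function.comp_def, List.length_eq_zero_iff]
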